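-- pv_equiv track=rewrite | github.com/francoleon08/proyecto-topicos-microservicios | recomendador/src/recommender/Recommender2.py | build_common_filter
-- ===== SOURCE A (Python) =====
-- from collections import Counter
--
-- def build_common_filter(movie_data):
--     all_genres = []
--     all_cast = []
--     all_directors = []
--
--     for movie in movie_data:
--         if "genres" in movie and movie["genres"]:
--             all_genres.extend(movie["genres"])
--         if "cast" in movie and movie["cast"]:
--             all_cast.extend(movie["cast"])
--         if "directors" in movie and movie["directors"]:
--             all_directors.extend(movie["directors"])
--
--     most_common_genre = Counter(all_genres).most_common(1)
--     most_common_cast = Counter(all_cast).most_common(1)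
--     most_common_director = Counter(all_directors).most_common(1)
--
--     return {
--         "genres": [most_common_genre[0][0] if most_common_genre else None],
--         "cast": [most_common_cast[0][0] if most_common_cast else None],
--         "directors": [most_common_director[0][0] if most_common_director else None]
--     }
-- ===== SOURCE B (Python) =====
-- def build_common_filter(movie_data):
--     def collect(key):
--         items = []
--         for movie in movie_data:
--             if key in movie and movie[key]:
--                 items.extend(movie[key])
--         return items
--
--     def most_common(items):
--         # scan first occurrences in order; strict '>' keeps the earliest on ties,
--         # exactly Counter(...).most_common(1)'s tie-break
--         best, best_n = None, 0
--         for i, x in enumerate(items):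
--             if x in items[:i]:
--                 continue
--             n = items.count(x)
--             if n > best_n:
--                 best, best_n = x, n
--         return best
--
--     return {key: [most_common(collect(key))] for key in ("genres", "cast", "directors")}
-- ===== Notes on version B (the rewrite author's own statement) =====
-- stated objective: alternative
-- what changed: B drops Counter and dicts entirely: it collects each category in its own staged pass, then finds the winner by a quadratic scan that visits each first occurrence in order and recounts it with list.count under a strict '>' (earliest-max wins, matching most_common(1)).
import Mathlib
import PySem

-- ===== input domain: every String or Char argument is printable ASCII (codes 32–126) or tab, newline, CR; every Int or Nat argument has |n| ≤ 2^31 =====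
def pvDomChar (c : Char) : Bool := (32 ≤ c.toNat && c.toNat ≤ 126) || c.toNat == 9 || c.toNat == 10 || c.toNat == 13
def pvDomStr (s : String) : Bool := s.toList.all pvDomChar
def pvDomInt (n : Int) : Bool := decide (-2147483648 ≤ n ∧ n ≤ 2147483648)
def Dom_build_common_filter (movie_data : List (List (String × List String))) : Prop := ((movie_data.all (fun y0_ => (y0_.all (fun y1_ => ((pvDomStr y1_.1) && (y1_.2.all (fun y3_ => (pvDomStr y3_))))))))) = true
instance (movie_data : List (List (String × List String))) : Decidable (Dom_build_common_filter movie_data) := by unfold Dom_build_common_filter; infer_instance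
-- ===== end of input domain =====

-- B replaces Counter+dicts with staged per-key collection passes and a quadratic first-occurrence
-- count scan (strict '>' over scan order = most_common's tie-break); alternative objective, equal output.

-- ===== PORT A =====
-- one iteration of A's for-loop: conditionally extend the three accumulator lists
def bcfStep (st : List String × List String × List String) (movie : List (String × List String)) :
    List String × List String × List String :=
  let g := match List.lookup "genres" movie with
    | some l => if l = [] then st.1 else st.1 ++ l
    | none => st.1
  let c := match List.lookup "cast" movie with
    | some l => if l = [] then st.2.1 else st.2.1 ++ l
    | none => st.2.1
  let d := match List.lookup "directors" movie with
    | some l => if l = [] then st.2.2 else st.2.2 ++ l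
    | none => st.2.2
  (g, c, d)

-- Counter(xs).most_common(1): heapq.nlargest(1, items, key=count) = first item of maximal count
-- (PySem.List.max? is the first-extremal element); then `[0][0] if … else None`.
def bcfMostCommon1 (xs : List String) : Option String :=
  (PySem.List.max? (PySem.Dict.counter xs).items (fun p => p.2)).map (fun p => p.1)

def build_common_filter (movie_data : List (List (String × List String))) : List (String × List (Option String)) :=
  let st := movie_data.foldl bcfStep ([], [], [])
  [("genres", [bcfMostCommon1 st.1]),
   ("cast", [bcfMostCommon1 st.2.1]),
   ("directors", [bcfMostCommon1 st.2.2])]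

-- ===== PORT B =====
-- B's `collect(key)`: one pass over movie_data for this key only
def bcfAltCollect (movie_data : List (List (String × List String))) (k : String) : List String :=
  movie_data.foldl
    (fun acc movie =>
      match List.lookup k movie with
      | some l => if l = [] then acc else acc ++ l
      | none => acc)
    []

-- B's `most_common(items)`: for i,x in enumerate(items): skip if x in items[:i],
-- else n = items.count(x); strict '>' argmax
def bcfAltMostCommon (items : List String) : Option String :=
  ((PySem.List.enumerate items 0).foldl
    (fun (b : Option String × Int) p =>
      if p.2 ∈ PySem.List.slice items none (some p.1) then b
      else if (items.count p.2 : Int) > b.2 then (some p.2, (items.count p.2 : Int)) else b)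
    (none, 0)).1

def build_common_filter_alt (movie_data : List (List (String × List String))) : List (String × List (Option String)) :=
  [("genres", [bcfAltMostCommon (bcfAltCollect movie_data "genres")]),
   ("cast", [bcfAltMostCommon (bcfAltCollect movie_data "cast")]),
   ("directors", [bcfAltMostCommon (bcfAltCollect movie_data "directors")])]

-- ===== PRECONDITION & SPEC =====
def Spec_build_common_filter (movie_data : List (List (String × List String))) (out : List (String × List (Option String))) : Prop := out = build_common_filter_alt movie_data
instance (movie_data : List (List (String × List String))) (out : List (String × List (Option String))) : Decidable (Spec_build_common_filter movie_data out) := by unfold Spec_build_common_filter; infer_instance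

-- ===== CLAIM (what is proved, stated in full; the proofs are below) =====
def Claim_equal_build_common_filter : Prop := ∀ (movie_data : List (List (String × List String))), Dom_build_common_filter movie_data → Spec_build_common_filter movie_data (build_common_filter movie_data)

-- ===== LEMMAS AND PROOFS =====

-- the items one movie contributes to category k
def bcfSel (k : String) (movie : List (String × List String)) : List String :=
  match List.lookup k movie with
  | some l => l
  | none => []

-- A's loop accumulates exactly the flattened selections
theorem bcfStep_fold (movies : List (List (String × List String)))
    (g c d : List String) :
    movies.foldl bcfStep (g, c, d) =
      (g ++ movies.flatMap (bcfSel "genres"),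
       c ++ movies.flatMap (bcfSel "cast"),
       d ++ movies.flatMap (bcfSel "directors")) := by
  induction movies generalizing g c d with
  | nil => simp
  | cons m ms ih =>
    simp only [List.foldl_cons, List.flatMap_cons]
    have h : bcfStep (g, c, d) m = (g ++ bcfSel "genres" m, c ++ bcfSel "cast" m, d ++ bcfSel "directors" m) := by
      simp only [bcfStep, bcfSel]
      cases List.lookup "genres" m <;> cases List.lookup "cast" m <;> cases List.lookup "directors" m <;>
        simp
    rw [h, ih]
    simp [List.append_assoc]

-- B's collect loop accumulates the same flattened selections
theorem bcfAltCollect_fold (movies : List (List (String × List String))) (k : String)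
    (acc : List String) :
    movies.foldl
      (fun acc movie =>
        match List.lookup k movie with
        | some l => if l = [] then acc else acc ++ l
        | none => acc)
      acc = acc ++ movies.flatMap (bcfSel k) := by
  induction movies generalizing acc with
  | nil => simp
  | cons m ms ih =>
    simp only [List.foldl_cons, List.flatMap_cons]
    have h : (match List.lookup k m with
        | some l => if l = [] then acc else acc ++ l
        | none => acc) = acc ++ bcfSel k m := by
      simp only [bcfSel]
      cases List.lookup k m with
      | none => simp
      | some l => dsimp only; split_ifs with hl <;> simp [hl]
    rw [h, ih, List.append_assoc]

-- named step functions of the two argmax scans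
def bcfMaxStep (acc : Option (String × Int)) (x : String × Int) : Option (String × Int) :=
  match acc with
  | none => some x
  | some m => if m.2 < x.2 then some x else some m

def bcfBestStep (b : Option String × Int) (p : String × Int) : Option String × Int :=
  if p.2 > b.2 then (some p.1, p.2) else b

theorem max?_eq_fold (ps : List (String × Int)) :
    PySem.List.max? ps (fun p => p.2) = ps.foldl bcfMaxStep none := by
  unfold PySem.List.max?
  congr 1
  funext acc x
  cases acc <;> rfl

-- relation between the two scans' states
def bcfRel (a : Option (String × Int)) (b : Option String × Int) : Prop :=
  match a with
  | none => b = (none, 0)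
  | some m => b = (some m.1, m.2) ∧ 0 < m.2

theorem bcfScan_aux (ps : List (String × Int)) (h : ∀ p ∈ ps, 0 < p.2)
    (a : Option (String × Int)) (b : Option String × Int) (hr : bcfRel a b) :
    bcfRel (ps.foldl bcfMaxStep a) (ps.foldl bcfBestStep b) := by
  induction ps generalizing a b with
  | nil => exact hr
  | cons p ps ih =>
    have hp : 0 < p.2 := h p (List.mem_cons_self ..)
    apply ih (fun q hq => h q (List.mem_cons_of_mem _ hq))
    cases a with
    | none =>
      simp only [bcfRel] at hr
      subst hr
      simp [bcfRel, bcfMaxStep, bcfBestStep, hp]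
    | some m =>
      obtain ⟨hb, hm⟩ := hr
      subst hb
      simp only [bcfRel, bcfMaxStep, bcfBestStep]
      by_cases hlt : m.2 < p.2 <;> simp [hlt, gt_iff_lt] <;> omega

-- the elements of `suffix` not yet seen in `pre`, first occurrences in order
def pvFirsts (pre : List String) : List String → List String
  | [] => []
  | x :: t => if x ∈ pre then pvFirsts (pre ++ [x]) t else x :: pvFirsts (pre ++ [x]) t

-- B's enumerate/slice skip-scan processes exactly the first occurrences, in order
theorem bcfSkipFold {α : Type} (f : α → String → α) (xs : List String) :
    ∀ (suffix pre : List String) (acc : α), pre ++ suffix = xs →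
    (PySem.List.enumerate suffix (pre.length : Int)).foldl
      (fun b p => if p.2 ∈ PySem.List.slice xs none (some p.1) then b else f b p.2) acc
    = (pvFirsts pre suffix).foldl f acc := by
  intro suffix
  induction suffix with
  | nil => intro pre acc _; simp [PySem.List.enumerate, pvFirsts]
  | cons x t ih =>
    intro pre acc hxs
    rw [PySem.List.enumerate_cons]
    have hslice : PySem.List.slice xs none (some (pre.length : Int)) = pre := by
      rw [PySem.List.slice_to_natCast, ← hxs, List.take_left]
    have hlen : (pre.length : Int) + 1 = (((pre ++ [x]).length : Nat) : Int) := by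
      simp
    have hxs' : (pre ++ [x]) ++ t = xs := by simpa using hxs
    simp only [List.foldl_cons, hslice, pvFirsts]
    by_cases hmem : x ∈ pre
    · simp only [hmem, if_pos]
      rw [hlen, ih (pre ++ [x]) acc hxs']
    · simp only [hmem, if_false, List.foldl_cons]
      rw [hlen, ih (pre ++ [x]) (f acc x) hxs']

-- pvFirsts [] = PySem.Set.ofList (foldl Set.add with a seen-list of the same members)
theorem pvFirsts_ofList_aux (xs : List String) :
    ∀ (s pre : List String), (∀ a, a ∈ s ↔ a ∈ pre) →
    xs.foldl PySem.Set.add s = s ++ pvFirsts pre xs := by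
  induction xs with
  | nil => intro s pre _; simp [pvFirsts]
  | cons x t ih =>
    intro s pre hsp
    simp only [List.foldl_cons, pvFirsts]
    by_cases hmem : x ∈ pre
    · have hadd : PySem.Set.add s x = s := by
        simp [PySem.Set.add, PySem.Set.contains, (hsp x).mpr hmem]
      rw [hadd, if_pos hmem, ih s (pre ++ [x]) (by
        intro a
        rw [hsp a, List.mem_append, List.mem_singleton]
        constructor
        · exact Or.inl
        · rintro (h | rfl)
          · exact h
          · exact hmem)]
    · have hxns : x ∉ s := fun h => hmem ((hsp x).mp h)
      have hadd : PySem.Set.add s x = s ++ [x] := by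
        simp [PySem.Set.add, PySem.Set.contains, hxns]
      rw [hadd, if_neg hmem, ih (s ++ [x]) (pre ++ [x]) (by intro a; simp [hsp a])]
      simp

theorem pvFirsts_eq_ofList (xs : List String) :
    pvFirsts [] xs = PySem.Set.ofList xs := by
  rw [PySem.Set.ofList_eq_foldl, pvFirsts_ofList_aux xs [] [] (by simp)]
  simp

-- B's most_common equals A's Counter(...).most_common(1)[0][0]-or-None
theorem bcfAltMostCommon_eq (xs : List String) :
    bcfMostCommon1 xs = bcfAltMostCommon xs := by
  have hskip := bcfSkipFold
      (fun (b : Option String × Int) x => bcfBestStep b (x, (xs.count x : Int))) xs xs [] (none, 0)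
      (by simp)
  have hbest : bcfAltMostCommon xs
      = (((PySem.Dict.counter xs).items).foldl bcfBestStep (none, 0)).1 := by
    unfold bcfAltMostCommon
    have : (PySem.List.enumerate xs 0).foldl
        (fun (b : Option String × Int) p =>
          if p.2 ∈ PySem.List.slice xs none (some p.1) then b
          else if (xs.count p.2 : Int) > b.2 then (some p.2, (xs.count p.2 : Int)) else b)
        (none, 0)
      = (pvFirsts [] xs).foldl
          (fun (b : Option String × Int) x => bcfBestStep b (x, (xs.count x : Int))) (none, 0) := by
      simpa [bcfBestStep] using hskip
    rw [this, pvFirsts_eq_ofList, ← List.foldl_map, ← PySem.Dict.items_counter]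
  have hpos : ∀ p ∈ (PySem.Dict.counter (κ := String) xs).items, 0 < p.2 := by
    intro p hp
    rw [PySem.Dict.items_counter] at hp
    obtain ⟨k, hk, rfl⟩ := List.mem_map.mp hp
    have : k ∈ xs := (PySem.Set.mem_ofList xs k).mp hk
    have := List.count_pos_iff.mpr this
    simpa using this
  have hrel := bcfScan_aux ((PySem.Dict.counter (κ := String) xs).items) hpos none (none, 0) rfl
  unfold bcfMostCommon1
  rw [max?_eq_fold, hbest]
  cases ha : ((PySem.Dict.counter (κ := String) xs).items).foldl bcfMaxStep none with
  | none =>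
    rw [ha] at hrel
    simp only [bcfRel] at hrel
    rw [hrel]
    rfl
  | some m =>
    rw [ha] at hrel
    obtain ⟨hb, _⟩ := hrel
    rw [hb]
    rfl

-- ===== VERDICT (by name: the statement is the Claim_ definition above) =====
theorem build_common_filter_spec : Claim_equal_build_common_filter := by
  intro movie_data _
  unfold Spec_build_common_filter build_common_filter build_common_filter_alt bcfAltCollect
  rw [bcfStep_fold, bcfAltCollect_fold, bcfAltCollect_fold, bcfAltCollect_fold]
  simp [bcfAltMostCommon_eq]
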